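-- pv_equiv track=rewrite | github.com/Moonsyn/Algorithm_Problem_Solve | 프로그래머스/1/92334. 신고 결과 받기/신고 결과 받기.py | solution
-- ===== SOURCE A (Python) =====
-- def solution(id_list, report, k):
--     answer = [0 for _ in range(len(id_list))]
--
--     id_index = {}
--     report_by = {}
--
--     for i in range(len(id_list)):
--         id = id_list[i]
--         id_index[id] = i
--
--     for r in report:
--         reporter, reported = map(str, r.split(" "))
--         if reported not in report_by:
--             report_by[reported] = set([reporter])
--         else:
--             report_by[reported].add(reporter)
--
--     for reported in report_by:
--         if len(report_by[reported]) < k: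
--             continue
--         for key in report_by[reported]:
--             answer[id_index[key]] += 1
--
--     return answer
-- ===== SOURCE B (Python) =====
-- def solution(id_list, report, k):
--     # One deduplicated flat pass over the reports, then a reporter-indexed accumulation.
--     seen = set()
--     pairs = []
--     for r in report:
--         reporter, reported = r.split(" ")
--         if (reporter, reported) not in seen:
--             seen.add((reporter, reported))
--             pairs.append((reporter, reported))
--     counts = {}
--     for _, reported in pairs:
--         counts[reported] = counts.get(reported, 0) + 1
--     banned = {u for u, c in counts.items() if c >= k}
--     index = {u: i for i, u in enumerate(id_list)}
--     answer = [0] * len(id_list)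
--     for reporter, reported in pairs:
--         if reported in banned:
--             answer[index[reporter]] += 1
--     return answer
-- ===== Notes on version B (the rewrite author's own statement) =====
-- stated objective: alternative
-- what changed: A groups reporters into per-reported-user sets and accumulates reported-indexed (for each banned user, bump every reporter in its set); B instead dedupes the reports into one flat pair list, counts distinct reporters per reported user over that list to form a banned set, and then does a single reporter-indexed pass bumping each deduped pair whose target is banned.
import Mathlib
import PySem

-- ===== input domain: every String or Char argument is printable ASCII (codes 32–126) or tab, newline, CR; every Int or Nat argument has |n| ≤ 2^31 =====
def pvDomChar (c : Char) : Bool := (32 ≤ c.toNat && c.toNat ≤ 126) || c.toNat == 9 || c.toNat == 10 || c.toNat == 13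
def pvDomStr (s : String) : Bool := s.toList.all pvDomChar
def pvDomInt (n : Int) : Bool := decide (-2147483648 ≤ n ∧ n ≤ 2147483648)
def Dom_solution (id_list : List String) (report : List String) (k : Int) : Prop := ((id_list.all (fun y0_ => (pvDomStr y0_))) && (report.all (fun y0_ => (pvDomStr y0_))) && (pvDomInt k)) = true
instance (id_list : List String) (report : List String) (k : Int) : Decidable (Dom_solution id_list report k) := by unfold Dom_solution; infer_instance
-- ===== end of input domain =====

-- B replaces A's reported-indexed accumulation over per-user reporter sets by a deduplicated
-- flat pair list with a count-based banned set and a reporter-indexed final pass (alternative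
-- decomposition, same asymptotic cost).

-- ===== PORT A =====
-- A's loop 'for i in range(len(id_list)): id_index[id_list[i]] = i'
def pvIdIndex (id_list : List String) : PySem.Dict String Int :=
  (PySem.List.pyRange 0 (PySem.List.len id_list) 1).foldl
    (fun d i => d.insert (PySem.List.pyGetD id_list i "") i) PySem.Dict.empty

-- the body of A's 'for r in report' grouping loop
-- (a report that does not split into exactly two fields raises in Python: outside Pre_)
def pvStepA (d : PySem.Dict String (PySem.Set String)) (r : String) :
    PySem.Dict String (PySem.Set String) :=
  match PySem.Str.split? r " " with
  | some [reporter, reported] =>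
      if !(d.contains reported) then d.insert reported (PySem.Set.ofList [reporter])
      else d.modify reported PySem.Set.empty (fun s => s.add reporter)
  | _ => d

def solution (id_list : List String) (report : List String) (k : Int) : List Int :=
  let answer : List Int := (PySem.List.pyRange 0 (PySem.List.len id_list) 1).map (fun _ => (0 : Int))
  let id_index := pvIdIndex id_list
  let report_by : PySem.Dict String (PySem.Set String) := report.foldl pvStepA PySem.Dict.empty
  report_by.items.foldl (fun ans p =>
    if (PySem.Set.len p.2 < k) then ans
    else p.2.foldl (fun ans key =>
      PySem.List.pySetD ans (id_index.getD key 0)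
        (PySem.List.pyGetD ans (id_index.getD key 0) 0 + 1)) ans) answer

-- ===== PORT B =====
-- B's index comprehension '{u: i for i, u in enumerate(id_list)}'
def pvIndexB (id_list : List String) : PySem.Dict String Int :=
  (PySem.List.enumerate id_list).foldl (fun d p => d.insert p.2 p.1) PySem.Dict.empty

-- the body of B's dedup loop over the reports
-- (a report that does not split into exactly two fields raises in Python: outside Pre_)
def pvStepB (st : PySem.Set (String × String) × List (String × String)) (r : String) :
    PySem.Set (String × String) × List (String × String) :=
  match PySem.Str.split? r " " with
  | some [reporter, reported] =>
      if !(st.1.contains (reporter, reported)) then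
        (st.1.add (reporter, reported), st.2 ++ [(reporter, reported)])
      else st
  | _ => st

def solution_alt (id_list : List String) (report : List String) (k : Int) : List Int :=
  let sp := report.foldl pvStepB (PySem.Set.empty, [])
  let pairs := sp.2
  let counts : PySem.Dict String Int :=
    pairs.foldl (fun d p => d.insert p.2 (d.getD p.2 0 + 1)) PySem.Dict.empty
  let banned : PySem.Set String :=
    counts.items.foldl (fun s p => if k ≤ p.2 then s.add p.1 else s) PySem.Set.empty
  let index := pvIndexB id_list
  let answer : List Int := List.replicate id_list.length 0
  pairs.foldl (fun ans p =>
    if banned.contains p.2 then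
      PySem.List.pySetD ans (index.getD p.1 0) (PySem.List.pyGetD ans (index.getD p.1 0) 0 + 1)
    else ans) answer

-- ===== PRECONDITION & SPEC =====
-- helpers for Pre_ (independent of both ports): parse one report, count distinct reporters of a user
def pvParse (r : String) : Option (String × String) :=
  match PySem.Str.split? r " " with
  | some [a, b] => some (a, b)
  | _ => none

def pvDistinct (report : List String) (b : String) : Nat :=
  ((PySem.List.dedup (report.filterMap pvParse)).filter (fun p => p.2 == b)).length

def pvOk (id_list : List String) (report : List String) (k : Int) (r : String) : Bool :=
  match pvParse r with
  | some p => !(decide (k ≤ (pvDistinct report p.2 : Int))) || id_list.contains p.1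
  | none => false

-- Pre_ excludes exactly the inputs where Python A raises: a report that does not split into
-- exactly two fields (ValueError on unpacking), and a reporter absent from id_list whose
-- reported target gathers at least k distinct reporters (KeyError in id_index).
def Pre_solution (id_list : List String) (report : List String) (k : Int) : Prop :=
  ∀ r ∈ report, pvOk id_list report k r = true
instance (id_list : List String) (report : List String) (k : Int) : Decidable (Pre_solution id_list report k) := by unfold Pre_solution; infer_instance

def pvWitness_solution : List String × List String × Int :=
  (["muzi", "frodo", "apeach", "neo"],
   ["muzi frodo", "apeach frodo", "frodo neo", "muzi neo", "apeach muzi"], 2)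

def Spec_solution (id_list : List String) (report : List String) (k : Int) (out : List Int) : Prop := out = solution_alt id_list report k
instance (id_list : List String) (report : List String) (k : Int) (out : List Int) : Decidable (Spec_solution id_list report k out) := by unfold Spec_solution; infer_instance

-- ===== CLAIM (what is proved, stated in full; the proofs are below) =====
def Claim_equal_solution : Prop := ∀ (id_list : List String) (report : List String) (k : Int), Dom_solution id_list report k → Pre_solution id_list report k → Spec_solution id_list report k (solution id_list report k)

-- ===== LEMMAS AND PROOFS =====

-- 'answer[i] += 1' as both ports write it, and its Nat-indexed form
def pvBumpI (ans : List Int) (i : Int) : List Int :=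
  PySem.List.pySetD ans i (PySem.List.pyGetD ans i 0 + 1)

def pvBump (ans : List Int) (p : Nat) : List Int := ans.set p (ans.getD p 0 + 1)

theorem pvBumpI_eq (ans : List Int) {i : Int} (h : 0 ≤ i) :
    pvBumpI ans i = pvBump ans i.toNat := by
  unfold pvBumpI pvBump
  rw [PySem.List.pySetD_of_nonneg _ _ h, PySem.List.pyGetD_of_nonneg _ _ h]

theorem pvBump_comm (ans : List Int) (p q : Nat) :
    pvBump (pvBump ans p) q = pvBump (pvBump ans q) p := by
  rcases eq_or_ne p q with rfl | hpq
  · rfl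
  · unfold pvBump
    have h1 : (ans.set p (ans.getD p 0 + 1)).getD q 0 = ans.getD q 0 := by
      simp [List.getD_eq_getElem?_getD, hpq]
      
    have h2 : (ans.set q (ans.getD q 0 + 1)).getD p 0 = ans.getD p 0 := by
      simp [List.getD_eq_getElem?_getD, hpq.symm]
    rw [h1, h2]
    exact List.set_comm _ _ hpq

theorem foldl_pvBump_perm {L1 L2 : List Nat} (h : L1.Perm L2) (ans : List Int) :
    L1.foldl pvBump ans = L2.foldl pvBump ans := by
  letI : RightCommutative pvBump := ⟨fun ans p q => (pvBump_comm ans p q)⟩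
  exact h.foldl_eq ans

def pvInv (d : PySem.Dict String (PySem.Set String)) (P : List (String × String)) : Prop :=
  d.keys = PySem.Set.ofList (P.map Prod.snd) ∧
  (∀ b : String, d.getD b PySem.Set.empty = (P.filter (fun p => p.2 == b)).map Prod.fst) ∧
  P.Nodup

theorem pvStep_inv (d : PySem.Dict String (PySem.Set String)) (P : List (String × String))
    (r : String) (h : pvInv d P) : pvInv (pvStepA d r) (pvStepB (P, P) r).2 := by
  obtain ⟨hkeys, hget, hnd⟩ := h
  have hcont : ∀ b : String, d.contains b = true ↔ b ∈ P.map Prod.snd := by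
    intro b
    rw [PySem.Dict.contains_iff_mem_keys, hkeys, PySem.Set.mem_ofList]
  rcases hs : PySem.Str.split? r " " with _ | (_ | ⟨a, _ | ⟨b, _ | ⟨c, rest⟩⟩⟩)
  case none =>
    have hA : pvStepA d r = d := by unfold pvStepA; rw [hs]
    have hB : (pvStepB (P, P) r).2 = P := by unfold pvStepB; rw [hs]
    rw [hA, hB]; exact ⟨hkeys, hget, hnd⟩
  case some.nil =>
    have hA : pvStepA d r = d := by unfold pvStepA; rw [hs]
    have hB : (pvStepB (P, P) r).2 = P := by unfold pvStepB; rw [hs]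
    rw [hA, hB]; exact ⟨hkeys, hget, hnd⟩
  case some.cons.nil =>
    have hA : pvStepA d r = d := by unfold pvStepA; rw [hs]
    have hB : (pvStepB (P, P) r).2 = P := by unfold pvStepB; rw [hs]
    rw [hA, hB]; exact ⟨hkeys, hget, hnd⟩
  case some.cons.cons.cons =>
    have hA : pvStepA d r = d := by unfold pvStepA; rw [hs]
    have hB : (pvStepB (P, P) r).2 = P := by unfold pvStepB; rw [hs]
    rw [hA, hB]; exact ⟨hkeys, hget, hnd⟩
  case some.cons.cons.nil =>
  have hA : pvStepA d r =
      (if !(d.contains b) then d.insert b (PySem.Set.ofList [a])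
       else d.modify b PySem.Set.empty (fun s => s.add a)) := by
    unfold pvStepA; rw [hs]
  have hB : (pvStepB (P, P) r).2 = (if (a, b) ∈ P then P else P ++ [(a, b)]) := by
    unfold pvStepB; rw [hs]
    by_cases hmem : (a, b) ∈ P <;>
      simp [PySem.Set.contains_eq_listContains, List.contains_eq_mem, hmem]
  rw [hA, hB]
  by_cases hmem : (a, b) ∈ P
  · -- the pair was seen before: B skips, A's set-add is a no-op
    have hbmem : b ∈ P.map Prod.snd := List.mem_map_of_mem hmem
    have hc : d.contains b = true := (hcont b).2 hbmem
    rw [if_pos hmem, if_neg (by simp [hc])]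
    refine ⟨?_, ?_, hnd⟩
    · rw [PySem.Dict.keys_modify, PySem.Dict.keys_insert_of_contains _ _ hc, hkeys]
    · intro b'
      rw [PySem.Dict.getD_modify]
      split_ifs with hb'
      · subst hb'
        rw [hget b', PySem.Set.add_of_mem]
        exact List.mem_map_of_mem (List.mem_filter.2 ⟨hmem, by simp⟩)
      · exact hget b'
  · -- new pair: B appends it, A inserts or extends the set of its target
    rw [if_neg hmem]
    have hfilter_app : ∀ b' : String, (P ++ [(a, b)]).filter (fun p => p.2 == b') =
        P.filter (fun p => p.2 == b') ++ if b = b' then [(a, b)] else [] := by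
      intro b'
      rw [List.filter_append]
      congr 1
      by_cases hbb : b = b' <;> simp [hbb]
    have hnd' : (P ++ [(a, b)]).Nodup := by
      simp [List.nodup_append, hnd]
      intro x y hxy h1 h2
      exact hmem (by rw [h1, h2] at hxy; exact hxy)
    by_cases hb : b ∈ P.map Prod.snd
    · have hc : d.contains b = true := (hcont b).2 hb
      rw [if_neg (by simp [hc])]
      refine ⟨?_, ?_, hnd'⟩
      · rw [PySem.Dict.keys_modify, PySem.Dict.keys_insert_of_contains _ _ hc, hkeys,
          List.map_append]
        simp only [List.map_cons, List.map_nil, PySem.Set.ofList_append_singleton]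
        rw [PySem.Set.add_of_mem]
        rwa [PySem.Set.mem_ofList]
      · intro b'
        rw [PySem.Dict.getD_modify, hfilter_app b']
        by_cases hb' : b' = b
        · subst hb'
          rw [if_pos rfl, if_pos rfl, hget b']
          have ha : a ∉ (P.filter (fun p => p.2 == b')).map Prod.fst := by
            intro hmm
            obtain ⟨p, hp, hpa⟩ := List.mem_map.1 hmm
            have hp2 : p.2 = b' := by simpa using (List.mem_filter.1 hp).2
            have : p = (a, b') := Prod.ext hpa hp2
            exact hmem (this ▸ (List.mem_filter.1 hp).1)
          rw [PySem.Set.add_of_not_mem ha]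
          simp
        · rw [if_neg hb', if_neg (Ne.symm hb'), List.append_nil, hget b']
    · have hc : d.contains b = false := by
        cases hcc : d.contains b
        · rfl
        · exact absurd ((hcont b).1 hcc) hb
      rw [if_pos (by simp [hc])]
      refine ⟨?_, ?_, hnd'⟩
      · rw [PySem.Dict.keys_insert_of_not_contains _ _ hc, hkeys, List.map_append]
        simp only [List.map_cons, List.map_nil, PySem.Set.ofList_append_singleton]
        rw [PySem.Set.add_of_not_mem (by rwa [PySem.Set.mem_ofList])]
      · intro b'
        rw [PySem.Dict.getD_insert, hfilter_app b']
        by_cases hb' : b' = b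
        · subst hb'
          have hfe : P.filter (fun p => p.2 == b') = [] := by
            rw [List.filter_eq_nil_iff]
            intro p hp hpb
            have hm2 := List.mem_map_of_mem (f := Prod.snd) hp
            rw [show p.2 = b' by simpa using hpb] at hm2
            exact hb hm2
          rw [if_pos rfl, if_pos rfl, hfe, List.nil_append]
          have : PySem.Set.ofList [a] = [a] :=
            PySem.Set.ofList_eq_self_of_nodup _ (by simp)
          rw [this]
          simp
        · rw [if_neg hb', if_neg (Ne.symm hb'), List.append_nil, hget b']

theorem pvStepB_fst (st : PySem.Set (String × String) × List (String × String)) (r : String)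
    (h : st.1 = st.2) : (pvStepB st r).1 = (pvStepB st r).2 := by
  unfold pvStepB
  rcases hs : PySem.Str.split? r " " with _ | (_ | ⟨a, _ | ⟨b, _ | ⟨c, rest⟩⟩⟩) <;>
    simp only [] <;> try exact h
  split_ifs with hc
  · have : (a, b) ∉ st.1 := by
      intro hm
      simp [PySem.Set.contains_eq_listContains, List.contains_eq_mem, hm] at hc
    rw [PySem.Set.add_of_not_mem this, h]
  · exact h

theorem pvFold_inv (report : List String) :
    ∀ (d : PySem.Dict String (PySem.Set String)) (st : PySem.Set (String × String) × List (String × String)),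
      pvInv d st.2 → st.1 = st.2 →
      pvInv (report.foldl pvStepA d) ((report.foldl pvStepB st).2) ∧
      (report.foldl pvStepB st).1 = (report.foldl pvStepB st).2 := by
  induction report with
  | nil => exact fun d st h he => ⟨h, he⟩
  | cons r rs ih =>
    intro d st h he
    obtain ⟨s, P⟩ := st
    simp only at he
    subst he
    simp only [List.foldl_cons]
    exact ih _ _ (pvStep_inv d s r h) (pvStepB_fst (s, s) r rfl)

theorem pvInv_empty : pvInv PySem.Dict.empty [] := by
  refine ⟨by simp, fun b => by simp [PySem.Dict.getD_empty], List.nodup_nil⟩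

-- both index dicts are the same dict
theorem pvIndex_eq (id_list : List String) : pvIndexB id_list = pvIdIndex id_list := by
  unfold pvIndexB pvIdIndex
  rw [PySem.List.enumerate_eq_map_pyRange id_list "", List.foldl_map]

-- all values of the id index are nonnegative
theorem pv_getD_nonneg_aux (l : List Int) (f : Int → String) :
    ∀ (d : PySem.Dict String Int), (∀ key, 0 ≤ d.getD key 0) → (∀ i ∈ l, 0 ≤ i) →
      ∀ key, 0 ≤ (l.foldl (fun d i => d.insert (f i) i) d).getD key 0 := by
  induction l with
  | nil => exact fun d hd _ key => hd key
  | cons i t ih =>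
    intro d hd hl key
    simp only [List.foldl_cons]
    refine ih _ (fun key' => ?_) (fun j hj => hl j (List.mem_cons_of_mem _ hj)) key
    rw [PySem.Dict.getD_insert]
    split_ifs
    · exact hl i List.mem_cons_self
    · exact hd key'

theorem pvIdIndex_getD_nonneg (id_list : List String) (key : String) :
    0 ≤ (pvIdIndex id_list).getD key 0 := by
  unfold pvIdIndex
  refine pv_getD_nonneg_aux _ _ _ (fun key' => by simp [PySem.Dict.getD_empty]) ?_ key
  intro i hi
  exact (PySem.List.mem_pyRange_one.1 hi).1

-- membership in a 'if q then s.add (f p)' fold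
theorem pv_mem_foldl_add_if {β : Type} (l : List β) (q : β → Prop) [DecidablePred q]
    (f : β → String) (s : PySem.Set String) (y : String) :
    (y ∈ l.foldl (fun s p => if q p then PySem.Set.add s (f p) else s) s) ↔
      (y ∈ s ∨ ∃ p ∈ l, q p ∧ y = f p) := by
  induction l generalizing s with
  | nil => simp
  | cons p t ih =>
    simp only [List.foldl_cons]
    rw [ih]
    by_cases hq : q p
    · simp only [if_pos hq, PySem.Set.mem_add, List.mem_cons]
      constructor
      · rintro ((hy | rfl) | ⟨p', hp', hq', rfl⟩)
        · exact Or.inl hy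
        · exact Or.inr ⟨p, Or.inl rfl, hq, rfl⟩
        · exact Or.inr ⟨p', Or.inr hp', hq', rfl⟩
      · rintro (hy | ⟨p', (rfl | hp'), hq', rfl⟩)
        · exact Or.inl (Or.inl hy)
        · exact Or.inl (Or.inr rfl)
        · exact Or.inr ⟨p', hp', hq', rfl⟩
    · simp only [if_neg hq, List.mem_cons]
      constructor
      · rintro (hy | ⟨p', hp', hq', rfl⟩)
        · exact Or.inl hy
        · exact Or.inr ⟨p', Or.inr hp', hq', rfl⟩
      · rintro (hy | ⟨p', (rfl | hp'), hq', rfl⟩)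
        · exact Or.inl hy
        · exact absurd hq' hq
        · exact Or.inr ⟨p', hp', hq', rfl⟩

-- flatMap of per-key filters of a Nodup pair list is Nodup
theorem pv_nodup_flatMap_filter (keysl : List String) (pairs : List (String × String))
    (hk : keysl.Nodup) (hp : pairs.Nodup) :
    (keysl.flatMap (fun b => pairs.filter (fun p => p.2 == b))).Nodup := by
  induction keysl with
  | nil => simp
  | cons b t ih =>
    simp only [List.flatMap_cons]
    rw [List.nodup_append]
    refine ⟨hp.filter _, ih (List.Nodup.of_cons hk), ?_⟩
    intro x hx1 y hy2 hxy
    have hxb : x.2 = b := by simpa using List.of_mem_filter hx1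
    obtain ⟨b', hb', hyb'⟩ := List.mem_flatMap.1 hy2
    have hyb : y.2 = b' := by simpa using List.of_mem_filter hyb'
    apply (List.nodup_cons.1 hk).1
    rw [hxy, hyb] at hxb
    exact hxb ▸ hb'

-- unfolding the two ports to their loop skeletons (definitional)
theorem solution_eq (id_list : List String) (report : List String) (k : Int) :
    solution id_list report k =
      (report.foldl pvStepA PySem.Dict.empty).items.foldl
        (fun ans p => if PySem.Set.len p.2 < k then ans
          else p.2.foldl (fun ans key => pvBumpI ans ((pvIdIndex id_list).getD key 0)) ans)
        ((PySem.List.pyRange 0 (PySem.List.len id_list) 1).map (fun _ => (0 : Int))) := rfl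

theorem solution_alt_eq (id_list : List String) (report : List String) (k : Int) :
    solution_alt id_list report k =
      (report.foldl pvStepB (PySem.Set.empty, [])).2.foldl
        (fun ans p =>
          if (((report.foldl pvStepB (PySem.Set.empty, [])).2.foldl
                  (fun d p => d.insert p.2 (d.getD p.2 0 + 1)) PySem.Dict.empty).items.foldl
                (fun s p => if k ≤ p.2 then s.add p.1 else s) PySem.Set.empty).contains p.2 then
            pvBumpI ans ((pvIndexB id_list).getD p.1 0)
          else ans)
        (List.replicate id_list.length 0) := rfl

theorem pv_counts_getD (P : List (String × String)) (b : String) :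
    ∀ d : PySem.Dict String Int,
      (P.foldl (fun d p => d.insert p.2 (d.getD p.2 0 + 1)) d).getD b 0
        = d.getD b 0 + ((P.map Prod.snd).count b : Int) := by
  induction P with
  | nil => simp
  | cons p t ih =>
    intro d
    simp only [List.foldl_cons, List.map_cons]
    rw [ih, PySem.Dict.getD_insert, List.count_cons]
    by_cases h : b = p.2
    · simp [h]; ring
    · simp [h]; exact Ne.symm h

theorem pv_len_eq (P : List (String × String)) (b : String) :
    PySem.Set.len ((P.filter (fun p => p.2 == b)).map Prod.fst) = ((P.map Prod.snd).count b : Int) := by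
  simp [PySem.Set.len, List.count_eq_countP, ← List.countP_eq_length_filter, List.countP_map,
    Function.comp_def]

-- the central equality
theorem pv_main (id_list : List String) (report : List String) (k : Int) :
    solution id_list report k = solution_alt id_list report k := by
  rw [solution_eq, solution_alt_eq]
  obtain ⟨hinv, -⟩ :=
    pvFold_inv report PySem.Dict.empty (PySem.Set.empty, ([] : List (String × String)))
      pvInv_empty rfl
  set P := (report.foldl pvStepB (PySem.Set.empty, ([] : List (String × String)))).2 with hPdef
  set D := report.foldl pvStepA PySem.Dict.empty with hDdef
  obtain ⟨hkeys, hget, hnd⟩ := hinv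
  set counts : PySem.Dict String Int :=
    P.foldl (fun d p => d.insert p.2 (d.getD p.2 0 + 1)) PySem.Dict.empty with hCdef
  set banned : PySem.Set String := counts.items.foldl
    (fun s p => if k ≤ p.2 then s.add p.1 else s) PySem.Set.empty with hBdef
  set idx := pvIdIndex id_list with hidxdef
  rw [pvIndex_eq, ← hidxdef]
  -- the two zero-filled answer rows coincide
  have hans : (PySem.List.pyRange 0 (PySem.List.len id_list) 1).map (fun _ => (0 : Int)) =
      List.replicate id_list.length 0 := by
    rw [List.map_const', PySem.List.length_pyRange_one]
    simp [PySem.List.len]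
  rw [hans]
  set ans0 := List.replicate id_list.length (0 : Int)
  -- facts about counts and banned
  have hDknd : D.keys.Nodup := by rw [hkeys]; exact PySem.Set.nodup_ofList _
  have hcnt : ∀ b, counts.getD b 0 = ((P.map Prod.snd).count b : Int) := by
    intro b; rw [hCdef, pv_counts_getD]; simp
  have hckeys : counts.keys = PySem.Set.ofList (P.map Prod.snd) := by
    rw [hCdef, PySem.Dict.keys_foldl_insert_key P Prod.snd (fun d p => d.getD p.2 0 + 1),
      PySem.Dict.keys_empty, PySem.Set.update_nil_left]
  have hcknd : counts.keys.Nodup := by rw [hckeys]; exact PySem.Set.nodup_ofList _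
  have hbanned : ∀ y, y ∈ banned ↔ (y ∈ P.map Prod.snd ∧ k ≤ ((P.map Prod.snd).count y : Int)) := by
    intro y
    rw [hBdef, pv_mem_foldl_add_if counts.items (fun p => k ≤ p.2) Prod.fst,
      PySem.Dict.items_eq_map_keys counts hcknd 0]
    constructor
    · rintro (h0 | ⟨p, hp, hkp, rfl⟩)
      · exact absurd h0 (List.not_mem_nil)
      · obtain ⟨u, hu, rfl⟩ := List.mem_map.1 hp
        rw [hckeys, PySem.Set.mem_ofList] at hu
        exact ⟨hu, by rwa [hcnt u] at hkp⟩
    · rintro ⟨hy, hky⟩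
      refine Or.inr ⟨(y, counts.getD y 0), ?_, by rwa [hcnt y], rfl⟩
      exact List.mem_map_of_mem (by rw [hckeys, PySem.Set.mem_ofList]; exact hy)
  -- B's final loop as a fold of bumps over the filtered pair list
  have hidxnn : ∀ key, 0 ≤ idx.getD key 0 := fun key => pvIdIndex_getD_nonneg id_list key
  rw [PySem.List.foldl_if_eq_foldl_filter (fun p => banned.contains p.2)
    (fun ans p => pvBumpI ans (idx.getD p.1 0)) P ans0]
  rw [PySem.List.foldl_congr_mem (P.filter (fun p => banned.contains p.2))
    (fun ans p => pvBumpI ans (idx.getD p.1 0))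
    (fun ans p => pvBump ans (idx.getD p.1 0).toNat) ans0
    (fun acc x _ => pvBumpI_eq acc (hidxnn x.1))]
  rw [← List.foldl_map (f := fun p : String × String => (idx.getD p.1 0).toNat) (g := pvBump)]
  -- A's final loop likewise
  rw [PySem.List.foldl_congr_mem D.items _
    (fun ans p => if ¬ PySem.Set.len p.2 < k then
        p.2.foldl (fun ans key => pvBumpI ans (idx.getD key 0)) ans else ans) _
    (fun acc x _ => by
      dsimp only
      by_cases h : PySem.Set.len x.2 < k
      · rw [if_pos h, if_neg (not_not_intro h)]
      · rw [if_neg h, if_pos h])]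
  rw [PySem.List.foldl_ite_eq_foldl_filter (fun p : String × PySem.Set String => ¬ PySem.Set.len p.2 < k)
    (fun ans p => p.2.foldl (fun ans key => pvBumpI ans (idx.getD key 0)) ans) D.items ans0]
  rw [← List.foldl_flatMap (f := fun p : String × PySem.Set String => p.2)
    (g := fun ans key => pvBumpI ans (idx.getD key 0))]
  rw [PySem.List.foldl_congr_mem _ (fun ans key => pvBumpI ans (idx.getD key 0))
    (fun ans key => pvBump ans (idx.getD key 0).toNat) ans0
    (fun acc x _ => pvBumpI_eq acc (hidxnn x))]
  rw [← List.foldl_map (f := fun key => (idx.getD key 0).toNat) (g := pvBump)]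
  -- reshape A's name list into a pair list
  rw [PySem.Dict.items_eq_map_keys D hDknd PySem.Set.empty, List.filter_map]
  simp only [List.flatMap_map]
  simp only [hget]
  rw [← List.map_flatMap]
  rw [List.map_map]
  -- the two pair lists are permutations of each other
  have hmemPB : ∀ x : String × String,
      x ∈ P.filter (fun p => banned.contains p.2) ↔
        (x ∈ P ∧ k ≤ ((P.map Prod.snd).count x.2 : Int)) := by
    intro x
    rw [List.mem_filter, PySem.Set.contains_eq_listContains, List.contains_eq_mem,
      decide_eq_true_eq, hbanned]
    constructor
    · rintro ⟨h1, _, h3⟩; exact ⟨h1, h3⟩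
    · rintro ⟨h1, h3⟩; exact ⟨h1, List.mem_map_of_mem h1, h3⟩
  have hperm : (List.flatMap (fun b => P.filter (fun p => p.2 == b))
        (D.keys.filter (fun b => decide (¬ PySem.Set.len
          (List.map Prod.fst (List.filter (fun p => p.2 == b) P)) < k)))).Perm
      (P.filter (fun p => banned.contains p.2)) := by
    apply (List.perm_ext_iff_of_nodup
      (pv_nodup_flatMap_filter _ P (hDknd.filter _) hnd) (hnd.filter _)).2
    intro x
    rw [hmemPB x, List.mem_flatMap]
    constructor
    · rintro ⟨b, hb, hx⟩
      obtain ⟨hbk, hblen⟩ := List.mem_filter.1 hb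
      obtain ⟨hxP, hx2⟩ := List.mem_filter.1 hx
      have hx2' : x.2 = b := by simpa using hx2
      refine ⟨hxP, ?_⟩
      have hl := of_decide_eq_true hblen
      rw [not_lt, pv_len_eq P b] at hl
      rwa [hx2']
    · rintro ⟨hxP, hk⟩
      refine ⟨x.2, List.mem_filter.2 ⟨?_, ?_⟩, List.mem_filter.2 ⟨hxP, by simp⟩⟩
      · rw [hkeys, PySem.Set.mem_ofList]; exact List.mem_map_of_mem hxP
      · rw [decide_eq_true_eq, not_lt, pv_len_eq P x.2]; exact hk
  exact foldl_pvBump_perm (hperm.map _) ans0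

-- ===== VERDICT (by name: the statement is the Claim_ definition above) =====
theorem solution_spec : Claim_equal_solution := by
  intro id_list report k _ _
  unfold Spec_solution
  exact pv_main id_list report k
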